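-- pv_equiv track=rewrite | github.com/ch83baker/cards_eq_solver | subset_graph_classes/my_subsets_encoding_tests.py | encode_bin_list_to_int
-- ===== SOURCE A (Python) =====
-- num_terms = 5
--
-- def encode_bin_list_to_int(my_tuple):
--     if len(my_tuple) != num_terms:
--         raise ValueError(f"Not a {num_terms}-length tuple!")
--     sum = 0
--     for j in range(num_terms):
--         if my_tuple[j]:
--             sum += 2**j
--     return sum
-- ===== SOURCE B (Python) =====
-- num_terms = 5
--
-- def encode_bin_list_to_int(my_tuple):
--     if len(my_tuple) != num_terms:
--         raise ValueError(f"Not a {num_terms}-length tuple!")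
--     bits = ''.join('1' if x else '0' for x in reversed(my_tuple))
--     return int(bits, 2)
-- ===== Notes on version B (the rewrite author's own statement) =====
-- stated objective: idiomatic
-- what changed: B replaces the per-index arithmetic accumulation of powers of two with building an MSB-first binary string from the reversed tuple and parsing it with int(s, 2).
import Mathlib
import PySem

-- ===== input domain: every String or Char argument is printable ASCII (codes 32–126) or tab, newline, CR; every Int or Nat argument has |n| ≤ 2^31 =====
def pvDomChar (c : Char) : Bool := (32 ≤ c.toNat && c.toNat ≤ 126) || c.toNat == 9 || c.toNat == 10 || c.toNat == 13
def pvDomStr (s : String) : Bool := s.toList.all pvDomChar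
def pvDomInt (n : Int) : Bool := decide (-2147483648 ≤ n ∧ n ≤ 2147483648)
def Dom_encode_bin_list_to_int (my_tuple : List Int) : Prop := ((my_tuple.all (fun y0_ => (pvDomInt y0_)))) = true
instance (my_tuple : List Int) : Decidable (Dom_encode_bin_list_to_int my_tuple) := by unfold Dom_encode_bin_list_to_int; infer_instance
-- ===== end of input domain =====

-- B builds an MSB-first binary string from the reversed tuple and parses it base 2 (idiomatic restatement; same value).
-- A raises ValueError when the tuple length is not 5; Pre_ excludes exactly those inputs.

-- ===== PORT A =====
def encode_bin_list_to_int (my_tuple : List Int) : Int :=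
  if my_tuple.length ≠ 5 then 0  -- ValueError in Python; excluded by Pre_
  else (PySem.List.pyRange 0 5 1).foldl
    (fun sum j =>
      if (PySem.List.pyGet? my_tuple j).getD 0 ≠ 0 then sum + 2 ^ j.toNat else sum) 0

-- ===== PORT B =====
-- int(bits, 2) ported by hand (exact for strings of '0'/'1' chars, which is all B builds):
-- MSB-first fold acc*2 + digit.
def encode_bin_list_to_int_alt (my_tuple : List Int) : Int :=
  if my_tuple.length ≠ 5 then 0  -- ValueError in Python; excluded by Pre_
  else
    let bits : List Char := my_tuple.reverse.map (fun x => if x ≠ 0 then '1' else '0')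
    bits.foldl (fun acc c => acc * 2 + (if c = '1' then 1 else 0)) 0

-- ===== PRECONDITION & SPEC =====
-- Pre_: A raises ValueError unless the tuple has exactly 5 elements.
def Pre_encode_bin_list_to_int (my_tuple : List Int) : Prop := my_tuple.length = 5
instance (my_tuple : List Int) : Decidable (Pre_encode_bin_list_to_int my_tuple) := by
  unfold Pre_encode_bin_list_to_int; infer_instance
def pvWitness_encode_bin_list_to_int : List Int := [1, 0, -3, 0, 7]

def Spec_encode_bin_list_to_int (my_tuple : List Int) (out : Int) : Prop := out = encode_bin_list_to_int_alt my_tuple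
instance (my_tuple : List Int) (out : Int) : Decidable (Spec_encode_bin_list_to_int my_tuple out) := by unfold Spec_encode_bin_list_to_int; infer_instance

-- ===== CLAIM (what is proved, stated in full; the proofs are below) =====
def Claim_equal_encode_bin_list_to_int : Prop := ∀ (my_tuple : List Int), Dom_encode_bin_list_to_int my_tuple → Pre_encode_bin_list_to_int my_tuple → Spec_encode_bin_list_to_int my_tuple (encode_bin_list_to_int my_tuple)

-- ===== LEMMAS AND PROOFS =====

-- ===== VERDICT (by name: the statement is the Claim_ definition above) =====
theorem encode_bin_list_to_int_spec : Claim_equal_encode_bin_list_to_int := by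
  intro t _ hpre
  unfold Pre_encode_bin_list_to_int at hpre
  obtain ⟨a, b, c, d, e, rfl⟩ : ∃ a b c d e, t = [a, b, c, d, e] := by
    match t, hpre with
    | [a, b, c, d, e], _ => exact ⟨a, b, c, d, e, rfl⟩
  unfold Spec_encode_bin_list_to_int encode_bin_list_to_int encode_bin_list_to_int_alt
  simp only [PySem.List.pyRange, PySem.List.pyGet?, PySem.List.pyIdx?]
  norm_num
  by_cases ha : a = 0 <;> by_cases hb : b = 0 <;> by_cases hc : c = 0 <;>
    by_cases hd : d = 0 <;> by_cases he : e = 0 <;>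
    simp [List.range_succ, ha, hb, hc, hd, he] <;> ring
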